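-- pv_equiv track=rewrite | github.com/zkstewart/Genome_analysis_scripts | gene_model_curate.py | only_transposon_domain_models
-- ===== SOURCE A (Python) =====
-- def only_transposon_domain_models(inputDict, transposonList):
--         # Set up
--         outputList = []
--         # Convert transposon list into set for intersection
--         transposonSet = set(transposonList)
--         for key, value in inputDict.items():
--                 # Produce set of annotated domains
--                 currDoms = set()
--                 for dom in value:
--                         currDoms.add(dom[0])
--                 # Intersect to find domains shared with transposonSet
--                 intersectDoms = currDoms.intersection(transposonSet)
--                 # Compare length of two sets; if len(intersect) == len(currDoms), then currDoms only contains transposn-associated domains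
--                 if len(intersectDoms) == len(currDoms):
--                         outputList.append(key)
--         return outputList
-- ===== SOURCE B (Python) =====
-- def only_transposon_domain_models(inputDict, transposonList):
--         # Simpler: one streaming membership scan per value, no intermediate set or intersection
--         transposonSet = set(transposonList)
--         return [key for key, value in inputDict.items()
--                 if all(dom[0] in transposonSet for dom in value)]
-- ===== Notes on version B (the rewrite author's own statement) =====
-- stated objective: simpler
-- what changed: Replaced the per-key build-a-set / intersect / compare-cardinalities pipeline with a single short-circuiting all() membership scan over the domains, emitted as a list comprehension.
import Mathlib
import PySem

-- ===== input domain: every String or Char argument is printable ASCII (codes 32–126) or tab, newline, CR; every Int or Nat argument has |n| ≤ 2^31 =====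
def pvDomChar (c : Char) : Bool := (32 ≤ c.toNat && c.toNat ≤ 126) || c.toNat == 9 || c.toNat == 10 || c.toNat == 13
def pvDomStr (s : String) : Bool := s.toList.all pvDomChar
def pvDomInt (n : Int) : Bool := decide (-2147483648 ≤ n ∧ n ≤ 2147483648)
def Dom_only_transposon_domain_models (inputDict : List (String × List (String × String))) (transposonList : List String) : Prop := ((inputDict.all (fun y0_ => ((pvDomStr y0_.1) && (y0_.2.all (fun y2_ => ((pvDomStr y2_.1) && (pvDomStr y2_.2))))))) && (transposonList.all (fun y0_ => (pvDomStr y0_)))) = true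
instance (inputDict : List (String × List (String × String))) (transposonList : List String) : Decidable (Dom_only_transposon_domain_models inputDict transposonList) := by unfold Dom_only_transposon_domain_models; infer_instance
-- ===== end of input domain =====

-- B replaces A's per-key set construction + intersection + cardinality comparison by a
-- single all-membership scan per key (simpler decomposition; same asymptotic cost).


-- ===== PORT A =====
def only_transposon_domain_models (inputDict : List (String × List (String × String))) (transposonList : List String) : List String :=
  -- outputList = []
  -- transposonSet = set(transposonList)
  let transposonSet : PySem.Set String := PySem.Set.ofList transposonList
  -- for key, value in inputDict.items(): …
  inputDict.foldl (fun outputList kv =>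
    -- currDoms = set(); for dom in value: currDoms.add(dom[0])
    let currDoms : PySem.Set String :=
      kv.2.foldl (fun s dom => PySem.Set.add s dom.1) PySem.Set.empty
    -- intersectDoms = currDoms.intersection(transposonSet)
    let intersectDoms := PySem.Set.inter currDoms transposonSet
    -- if len(intersectDoms) == len(currDoms): outputList.append(key)
    if PySem.List.len intersectDoms = PySem.List.len currDoms then outputList ++ [kv.1]
    else outputList) []

-- ===== PORT B =====
def only_transposon_domain_models_alt (inputDict : List (String × List (String × String))) (transposonList : List String) : List String :=
  -- transposonSet = set(transposonList)
  let transposonSet : PySem.Set String := PySem.Set.ofList transposonList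
  -- [key for key, value in inputDict.items() if all(dom[0] in transposonSet for dom in value)]
  (inputDict.filter (fun kv => kv.2.all (fun dom => PySem.Set.contains transposonSet dom.1))).map
    (fun kv => kv.1)

-- ===== PRECONDITION & SPEC =====
def Spec_only_transposon_domain_models (inputDict : List (String × List (String × String))) (transposonList : List String) (out : List String) : Prop := out = only_transposon_domain_models_alt inputDict transposonList
instance (inputDict : List (String × List (String × String))) (transposonList : List String) (out : List String) : Decidable (Spec_only_transposon_domain_models inputDict transposonList out) := by unfold Spec_only_transposon_domain_models; infer_instance

-- ===== CLAIM (what is proved, stated in full; the proofs are below) =====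
def Claim_equal_only_transposon_domain_models : Prop := ∀ (inputDict : List (String × List (String × String))) (transposonList : List String), Dom_only_transposon_domain_models inputDict transposonList → Spec_only_transposon_domain_models inputDict transposonList (only_transposon_domain_models inputDict transposonList)

-- ===== LEMMAS AND PROOFS =====

-- A's per-key test (|currDoms ∩ T| = |currDoms|) coincides with B's all-membership test.
theorem pv_cond_eq (value : List (String × String)) (T : List String) :
    (PySem.List.len (PySem.Set.inter
        (value.foldl (fun s dom => PySem.Set.add s dom.1) PySem.Set.empty) (PySem.Set.ofList T))
      = PySem.List.len (value.foldl (fun s dom => PySem.Set.add s dom.1) PySem.Set.empty))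
    ↔ value.all (fun dom => PySem.Set.contains (PySem.Set.ofList T) dom.1) = true := by
  have hfold : value.foldl (fun s dom => PySem.Set.add s dom.1) PySem.Set.empty
      = PySem.Set.ofList (value.map (fun dom => dom.1)) := by
    rw [← PySem.Set.update_map_eq_foldl_add]
    exact PySem.Set.update_nil_left _
  rw [hfold]
  set C := PySem.Set.ofList (value.map (fun dom => dom.1)) with hC
  constructor
  · intro hlen
    have hlenN : (PySem.Set.inter C (PySem.Set.ofList T)).length = C.length := by
      simpa [PySem.List.len] using hlen
    -- inter C T = C.filter p; a filter with full length keeps everything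
    have hall : ∀ x ∈ C, x ∈ PySem.Set.ofList T := by
      intro x hx
      have : C.filter (fun x => (PySem.Set.ofList T).contains x) = C := by
        exact List.Sublist.eq_of_length List.filter_sublist hlenN
      have hx' : x ∈ C.filter (fun x => (PySem.Set.ofList T).contains x) := this.symm ▸ hx
      have := (List.mem_filter.mp hx').2
      simpa [PySem.Set.contains_iff] using this
    simp only [List.all_eq_true]
    intro dom hdom
    have : dom.1 ∈ C := by
      rw [hC, PySem.Set.mem_ofList]
      exact List.mem_map.mpr ⟨dom, hdom, rfl⟩
    simpa [PySem.Set.contains_iff] using hall _ this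
  · intro hall
    have : C.filter (fun x => (PySem.Set.ofList T).contains x) = C := by
      apply List.filter_eq_self.mpr
      intro x hx
      have hx' : x ∈ value.map (fun dom => dom.1) := by
        rw [hC, PySem.Set.mem_ofList] at hx; exact hx
      obtain ⟨dom, hdom, rfl⟩ := List.mem_map.mp hx'
      exact (List.all_eq_true.mp hall) dom hdom
    show PySem.List.len (C.filter _) = PySem.List.len C
    rw [this]

theorem only_transposon_domain_models_foldl (inputDict : List (String × List (String × String)))
    (transposonList : List String) (acc : List String) :
    inputDict.foldl (fun outputList kv =>
      let currDoms : PySem.Set String :=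
        kv.2.foldl (fun s dom => PySem.Set.add s dom.1) PySem.Set.empty
      let intersectDoms := PySem.Set.inter currDoms (PySem.Set.ofList transposonList)
      if PySem.List.len intersectDoms = PySem.List.len currDoms then outputList ++ [kv.1]
      else outputList) acc
    = acc ++ (inputDict.filter (fun kv =>
        kv.2.all (fun dom => PySem.Set.contains (PySem.Set.ofList transposonList) dom.1))).map
        (fun kv => kv.1) := by
  induction inputDict generalizing acc with
  | nil => simp
  | cons kv rest ih =>
    simp only [List.foldl_cons, List.filter_cons]
    by_cases h : kv.2.all (fun dom => PySem.Set.contains (PySem.Set.ofList transposonList) dom.1) = true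
    · rw [if_pos ((pv_cond_eq kv.2 transposonList).mpr h), if_pos h, ih]
      simp
    · rw [if_neg (fun hc => h ((pv_cond_eq kv.2 transposonList).mp hc)), if_neg h, ih]

-- ===== VERDICT (by name: the statement is the Claim_ definition above) =====
theorem only_transposon_domain_models_spec : Claim_equal_only_transposon_domain_models := by
  intro inputDict transposonList _
  show only_transposon_domain_models inputDict transposonList = _
  unfold only_transposon_domain_models only_transposon_domain_models_alt
  simpa using only_transposon_domain_models_foldl inputDict transposonList []
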